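-- pv_equiv track=rewrite | github.com/Akash8292/AI-Agent | backend/app.py | legacy_keyword_search
-- ===== SOURCE A (Python) =====
-- def legacy_keyword_search(dataset, user_question):
--     """Keyword search for old-format datasets with training_data / qa_pairs."""
--     question_lower = user_question.lower()
--     stopwords = {
--         "what","are","is","the","a","an","at","kfc","does","do","have","tell",
--         "me","about","can","i","get","how","much","any","some","there","their",
--         "for","in","of","please","you","your","my","its","and","or","to","with"
--     }
--     keywords = [w for w in question_lower.split() if w not in stopwords and len(w) > 2]
--     if not keywords:
--         return [], 0
--
--     scored = []
--     for item in dataset.get('training_data', []):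
--         q_lower   = item['instruction'].lower()
--         full_text = q_lower + ' ' + item['response'].lower()
--         score = sum(3 if kw in q_lower else 1 for kw in keywords if kw in full_text)
--         if score > 0:
--             scored.append((score, item['instruction'], item['response']))
--
--     for item in dataset.get('qa_pairs', []):
--         q_lower   = item['question'].lower()
--         full_text = q_lower + ' ' + item['answer'].lower()
--         score = sum(3 if kw in q_lower else 1 for kw in keywords if kw in full_text)
--         if score > 0:
--             scored.append((score, item['question'], item['answer']))
--
--     scored.sort(key=lambda x: x[0], reverse=True)
--     best = scored[0][0] if scored else 0
--     return scored[:3], best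
-- ===== SOURCE B (Python) =====
-- def legacy_keyword_search(dataset, user_question):
--     """Streaming top-3 selection: no full scored list and no sort call.
--
--     Entries from both dataset sections are scanned once (table-driven); each
--     positive-scoring entry is inserted into a bounded, descending, stable
--     top-3 list (insert after all entries with >= score, then truncate)."""
--     stopwords = {
--         "what","are","is","the","a","an","at","kfc","does","do","have","tell",
--         "me","about","can","i","get","how","much","any","some","there","their",
--         "for","in","of","please","you","your","my","its","and","or","to","with"
--     }
--     keywords = [w for w in user_question.lower().split() if w not in stopwords and len(w) > 2]
--     if not keywords:
--         return [], 0
--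
--     top = []  # at most 3 entries, descending score, stable on ties
--     for section, qk, ak in (("training_data", "instruction", "response"),
--                             ("qa_pairs", "question", "answer")):
--         for item in dataset.get(section, []):
--             q, a = item[qk], item[ak]
--             ql = q.lower()
--             full = ql + ' ' + a.lower()
--             score = len([kw for kw in keywords if kw in full]) \
--                   + 2 * len([kw for kw in keywords if kw in ql])
--             if score > 0:
--                 i = 0
--                 while i < len(top) and top[i][0] >= score:
--                     i += 1
--                 top.insert(i, (score, q, a))
--                 del top[3:]
--
--     best = top[0][0] if top else 0
--     return top, best
-- ===== Notes on version B (the rewrite author's own statement) =====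
-- stated objective: alternative
-- what changed: B never builds nor sorts a scored list: a single table-driven pass over both sections streams each positive-scoring entry into a bounded descending stable top-3 list (insert after all >=-score entries, truncate to 3), with the score counted as matches-in-text + 2*matches-in-question; A builds the full scored list in two typed loops and sorts it before slicing.
import Mathlib
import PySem

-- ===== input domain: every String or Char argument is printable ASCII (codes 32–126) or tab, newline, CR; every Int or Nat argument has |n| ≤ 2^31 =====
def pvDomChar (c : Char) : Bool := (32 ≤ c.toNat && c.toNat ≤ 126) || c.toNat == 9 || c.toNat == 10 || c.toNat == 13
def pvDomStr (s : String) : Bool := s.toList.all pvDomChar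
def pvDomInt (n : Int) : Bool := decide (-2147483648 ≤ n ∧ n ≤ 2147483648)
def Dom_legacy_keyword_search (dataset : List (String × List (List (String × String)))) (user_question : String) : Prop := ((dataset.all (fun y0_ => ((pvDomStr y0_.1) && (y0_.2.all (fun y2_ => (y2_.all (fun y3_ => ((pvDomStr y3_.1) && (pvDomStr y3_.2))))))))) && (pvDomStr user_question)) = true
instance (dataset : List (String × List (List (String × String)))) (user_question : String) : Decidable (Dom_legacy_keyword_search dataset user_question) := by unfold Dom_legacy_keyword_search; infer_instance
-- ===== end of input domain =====

-- B streams entries of both sections once (table-driven) into a bounded descending stable top-3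
-- list by insertion, never building or sorting a full scored list; objective: alternative.

-- the stopword set, shared verbatim by both programs
def pvStopwords : List (List Char) :=
  ["what".toList,"are".toList,"is".toList,"the".toList,"a".toList,"an".toList,"at".toList,
   "kfc".toList,"does".toList,"do".toList,"have".toList,"tell".toList,"me".toList,"about".toList,
   "can".toList,"i".toList,"get".toList,"how".toList,"much".toList,"any".toList,"some".toList,
   "there".toList,"their".toList,"for".toList,"in".toList,"of".toList,"please".toList,
   "you".toList,"your".toList,"my".toList,"its".toList,"and".toList,"or".toList,"to".toList,
   "with".toList]

-- keywords = [w for w in user_question.lower().split() if w not in stopwords and len(w) > 2]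
def pvKeywords (user_question : String) : List (List Char) :=
  (PySem.Chars.split₀ (PySem.Chars.lower user_question.toList)).filter
    (fun w => !pvStopwords.contains w && decide (2 < w.length))

-- ===== PORT A =====
def legacy_keyword_search (dataset : List (String × List (List (String × String)))) (user_question : String) : (List (Int × String × String)) × Int :=
  let keywords := pvKeywords user_question
  if keywords = [] then ([], 0) else
    let d := PySem.Dict.mk dataset
    -- first loop: training_data items, keys 'instruction' / 'response' (KeyError excluded by Pre_)
    let scored := (d.getD "training_data" []).foldl (fun acc item =>
      let it := PySem.Dict.mk item
      let q := (it.get? "instruction").getD ""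
      let r := (it.get? "response").getD ""
      let q_lower := PySem.Chars.lower q.toList
      let full_text := q_lower ++ ' ' :: PySem.Chars.lower r.toList
      let score : Int := keywords.foldl (fun s kw =>
        s + (if PySem.Chars.isIn kw full_text then (if PySem.Chars.isIn kw q_lower then 3 else 1) else 0)) 0
      if score > 0 then acc ++ [(score, q, r)] else acc) []
    -- second loop: qa_pairs items, keys 'question' / 'answer'
    let scored := (d.getD "qa_pairs" []).foldl (fun acc item =>
      let it := PySem.Dict.mk item
      let q := (it.get? "question").getD ""
      let r := (it.get? "answer").getD ""
      let q_lower := PySem.Chars.lower q.toList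
      let full_text := q_lower ++ ' ' :: PySem.Chars.lower r.toList
      let score : Int := keywords.foldl (fun s kw =>
        s + (if PySem.Chars.isIn kw full_text then (if PySem.Chars.isIn kw q_lower then 3 else 1) else 0)) 0
      if score > 0 then acc ++ [(score, q, r)] else acc) scored
    let scored := PySem.List.sorted scored (fun x => x.1) true
    (PySem.List.slice scored none (some 3), match scored with | [] => 0 | x :: _ => x.1)

-- ===== PORT B =====
-- B's while loop: advance past every entry with score >= the new one, insert there
def pvInsertTop (x : Int × String × String) : List (Int × String × String) → List (Int × String × String)
  | [] => [x]
  | y :: ys => if y.1 ≥ x.1 then y :: pvInsertTop x ys else x :: y :: ys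

def legacy_keyword_search_alt (dataset : List (String × List (List (String × String)))) (user_question : String) : (List (Int × String × String)) × Int :=
  let keywords := pvKeywords user_question
  if keywords = [] then ([], 0) else
    let d := PySem.Dict.mk dataset
    -- one table-driven pass; 'top' is the bounded (≤ 3) descending stable selection so far
    let top := [("training_data", "instruction", "response"), ("qa_pairs", "question", "answer")].foldl
      (fun top sec =>
        (d.getD sec.1 []).foldl (fun top item =>
          let it := PySem.Dict.mk item
          let q := (it.get? sec.2.1).getD ""
          let a := (it.get? sec.2.2).getD ""
          let ql := PySem.Chars.lower q.toList
          let full := ql ++ ' ' :: PySem.Chars.lower a.toList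
          let score : Int := ((keywords.filter (fun kw => PySem.Chars.isIn kw full)).length : Int)
            + 2 * ((keywords.filter (fun kw => PySem.Chars.isIn kw ql)).length : Int)
          if score > 0 then (pvInsertTop (score, q, a) top).take 3 else top) top) []
    (top, match top with | [] => 0 | x :: _ => x.1)

-- ===== PRECONDITION & SPEC =====
-- Pre_ excludes exactly the inputs where A raises KeyError: some scored item lacks its
-- 'instruction'/'response' (resp. 'question'/'answer') key while the question yields keywords.
def Pre_legacy_keyword_search (dataset : List (String × List (List (String × String)))) (user_question : String) : Prop :=
  pvKeywords user_question ≠ [] →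
    ((∀ item ∈ (PySem.Dict.mk dataset).getD "training_data" [],
        (PySem.Dict.mk item).contains "instruction" ∧ (PySem.Dict.mk item).contains "response") ∧
     (∀ item ∈ (PySem.Dict.mk dataset).getD "qa_pairs" [],
        (PySem.Dict.mk item).contains "question" ∧ (PySem.Dict.mk item).contains "answer"))
instance (dataset : List (String × List (List (String × String)))) (user_question : String) : Decidable (Pre_legacy_keyword_search dataset user_question) := by unfold Pre_legacy_keyword_search; infer_instance

def pvWitness_legacy_keyword_search : (List (String × List (List (String × String)))) × String :=
  ([("training_data", [[("instruction", "KFC menu list"), ("response", "We sell burgers")]]),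
    ("qa_pairs", [[("question", "price of a burger"), ("answer", "Five dollars")]])],
   "what is the burger price")

def Spec_legacy_keyword_search (dataset : List (String × List (List (String × String)))) (user_question : String) (out : (List (Int × String × String)) × Int) : Prop := out = legacy_keyword_search_alt dataset user_question
instance (dataset : List (String × List (List (String × String)))) (user_question : String) (out : (List (Int × String × String)) × Int) : Decidable (Spec_legacy_keyword_search dataset user_question out) := by unfold Spec_legacy_keyword_search; infer_instance

-- ===== CLAIM (what is proved, stated in full; the proofs are below) =====
def Claim_equal_legacy_keyword_search : Prop := ∀ (dataset : List (String × List (List (String × String)))) (user_question : String), Dom_legacy_keyword_search dataset user_question → Pre_legacy_keyword_search dataset user_question → Spec_legacy_keyword_search dataset user_question (legacy_keyword_search dataset user_question)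

-- ===== LEMMAS AND PROOFS =====

-- a keyword found in the question part is found in the full text (the question is a prefix)
theorem pv_isIn_of_isIn_prefix (kw ql rest : List Char)
    (h : PySem.Chars.isIn kw ql = true) : PySem.Chars.isIn kw (ql ++ rest) = true := by
  rw [PySem.Chars.isIn_iff_infix] at h ⊢
  exact h.trans (List.prefix_append ql rest).isInfix

-- per-item score: A's 3/1 conditional sum equals B's count-based formula
theorem pv_score_eq (ql rest : List Char) :
    ∀ (kws : List (List Char)) (s : Int),
    kws.foldl (fun s kw =>
      s + (if PySem.Chars.isIn kw (ql ++ rest) then (if PySem.Chars.isIn kw ql then 3 else 1) else 0)) s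
    = s + ((kws.filter (fun kw => PySem.Chars.isIn kw (ql ++ rest))).length : Int)
        + 2 * ((kws.filter (fun kw => PySem.Chars.isIn kw ql)).length : Int) := by
  intro kws
  induction kws with
  | nil => intro s; simp
  | cons kw kws ih =>
    intro s
    simp only [List.foldl_cons, List.filter_cons]
    rw [ih]
    by_cases hq : PySem.Chars.isIn kw ql = true
    · simp [hq, pv_isIn_of_isIn_prefix kw ql rest hq]; ring
    · simp only [Bool.not_eq_true] at hq
      by_cases hf : PySem.Chars.isIn kw (ql ++ rest) = true
      · simp [hq, hf]; ring
      · simp only [Bool.not_eq_true] at hf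
        simp [hq, hf]

-- the same with accumulator 0, in the exact shape of the ports
theorem pv_score_eq0 (ql rest : List Char) (kws : List (List Char)) :
    kws.foldl (fun s kw =>
      s + (if PySem.Chars.isIn kw (ql ++ rest) then (if PySem.Chars.isIn kw ql then 3 else 1) else 0)) (0 : Int)
    = ((kws.filter (fun kw => PySem.Chars.isIn kw (ql ++ rest))).length : Int)
        + 2 * ((kws.filter (fun kw => PySem.Chars.isIn kw ql)).length : Int) := by
  rw [pv_score_eq]; ring

-- B's insertion while-loop IS PySem's stable descending insertBy
theorem pv_insertTop_eq (x : Int × String × String) (ys : List (Int × String × String)) :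
    pvInsertTop x ys = PySem.List.insertBy (fun a b => decide (b.1 < a.1)) x ys := by
  induction ys with
  | nil => simp [pvInsertTop, PySem.List.insertBy]
  | cons y ys ih =>
    simp only [pvInsertTop, PySem.List.insertBy, ih]
    by_cases h : y.1 ≥ x.1
    · have : ¬ (y.1 < x.1) := not_lt.mpr h
      simp [h, this]
    · have : y.1 < x.1 := lt_of_not_ge h
      simp [h, this]

-- truncating a cons of a truncation
theorem pv_take_cons_take {α : Type} (y : α) (l : List α) (m : Nat) :
    (y :: l.take m).take m = (y :: l).take m := by
  cases m with
  | zero => rfl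
  | succ k => simp only [List.take_succ_cons, List.take_take, Nat.min_eq_left (Nat.le_succ k)]

-- truncation commutes with insertBy
theorem pv_take_insertBy {α : Type} (before : α → α → Bool) (x : α) :
    ∀ (ys : List α) (n : Nat),
    (PySem.List.insertBy before x ys).take n = ((PySem.List.insertBy before x (ys.take n)).take n) := by
  intro ys
  induction ys with
  | nil => intro n; simp
  | cons y ys ih =>
    intro n
    cases n with
    | zero => simp
    | succ m =>
      by_cases h : before x y = true
      · simp only [PySem.List.insertBy, List.take_succ_cons, h, if_true]
        rw [pv_take_cons_take]
      · simp only [PySem.List.insertBy, List.take_succ_cons, h, Bool.false_eq_true, if_false]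
        rw [ih]

-- the streaming invariant: folding truncated insertions over the selected entries computes
-- the truncation of the insertBy-fold (i.e. of the stable descending sort) of A's scored list
theorem pv_fold_invariant {α ι : Type} (before : α → α → Bool) (P : ι → Prop) [DecidablePred P]
    (f : ι → α) :
    ∀ (items : List ι) (a0 : List α),
    items.foldl (fun b it => if P it then (PySem.List.insertBy before (f it) b).take 3 else b)
      ((List.foldl (fun acc e => PySem.List.insertBy before e acc) [] a0).take 3)
    = (List.foldl (fun acc e => PySem.List.insertBy before e acc) []
        (items.foldl (fun a it => if P it then a ++ [f it] else a) a0)).take 3 := by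
  intro items
  induction items with
  | nil => intro a0; rfl
  | cons it items ih =>
    intro a0
    simp only [List.foldl_cons]
    by_cases h : P it
    · simp only [h, if_true]
      have hF : List.foldl (fun acc e => PySem.List.insertBy before e acc) [] (a0 ++ [f it])
          = PySem.List.insertBy before (f it)
              (List.foldl (fun acc e => PySem.List.insertBy before e acc) [] a0) := by
        rw [List.foldl_append]; rfl
      rw [← pv_take_insertBy, ← hF, ih]
    · simp only [h, if_false]
      exact ih a0

-- the best score read off the truncated list equals the one read off the full sorted list
theorem pv_pair_take_match (L : List (Int × String × String)) :
    (L.take 3, (match L with | [] => (0 : Int) | x :: _ => x.1)) =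
    (L.take 3, (match L.take 3 with | [] => (0 : Int) | x :: _ => x.1)) := by
  cases L <;> rfl

-- item field lookup and the count-based score, named for instantiating the invariant lemma
def pvQ (item : List (String × String)) (k : String) : String :=
  ((PySem.Dict.mk item).get? k).getD ""

def pvScoreC (kws : List (List Char)) (k1 k2 : String) (item : List (String × String)) : Int :=
  ((kws.filter (fun kw => PySem.Chars.isIn kw
      (PySem.Chars.lower (pvQ item k1).toList ++ ' ' :: PySem.Chars.lower (pvQ item k2).toList))).length : Int)
  + 2 * ((kws.filter (fun kw => PySem.Chars.isIn kw (PySem.Chars.lower (pvQ item k1).toList))).length : Int)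

-- ===== VERDICT (by name: the statement is the Claim_ definition above) =====
theorem legacy_keyword_search_spec : Claim_equal_legacy_keyword_search := by
  intro dataset user_question _hdom _hpre
  unfold Spec_legacy_keyword_search legacy_keyword_search legacy_keyword_search_alt
  by_cases hk : pvKeywords user_question = []
  · simp [hk]
  · simp only [hk, if_false, List.foldl_cons, List.foldl_nil, pv_insertTop_eq, pv_score_eq0]
    have hsl : ∀ (xs : List (Int × String × String)), PySem.List.slice xs none (some 3) = xs.take 3 :=
      fun xs => PySem.List.slice_to xs (by norm_num)
    rw [PySem.List.sorted_rev_eq_foldl_insertBy, hsl]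
    have h1 := pv_fold_invariant (fun (a b : Int × String × String) => decide (b.1 < a.1))
      (fun item => pvScoreC (pvKeywords user_question) "instruction" "response" item > 0)
      (fun item => (pvScoreC (pvKeywords user_question) "instruction" "response" item,
                    pvQ item "instruction", pvQ item "response"))
      ((PySem.Dict.mk dataset).getD "training_data" []) []
    simp only [List.foldl_nil, List.take_nil, pvScoreC, pvQ] at h1
    rw [h1]
    have h2 := pv_fold_invariant (fun (a b : Int × String × String) => decide (b.1 < a.1))
      (fun item => pvScoreC (pvKeywords user_question) "question" "answer" item > 0)
      (fun item => (pvScoreC (pvKeywords user_question) "question" "answer" item,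
                    pvQ item "question", pvQ item "answer"))
      ((PySem.Dict.mk dataset).getD "qa_pairs" [])
      (((PySem.Dict.mk dataset).getD "training_data" []).foldl
        (fun a item => if pvScoreC (pvKeywords user_question) "instruction" "response" item > 0
          then a ++ [(pvScoreC (pvKeywords user_question) "instruction" "response" item,
                      pvQ item "instruction", pvQ item "response")] else a) [])
    simp only [pvScoreC, pvQ] at h2
    rw [h2]
    exact pv_pair_take_match _
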